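-- pv_equiv track=rewrite | github.com/isaksamsten/tsexplain | tstransform/transform.py | locked_iter
-- ===== SOURCE A (Python) =====
-- def locked_iter(locked, start, end):
--     """iterates over unlocked regions. `locked must be sorterd`
--
--     :param locked: a list of tuples `[(start_lock, end_lock)]`
--     :param start: first index
--     :param end: last index
--     :yield: unlocked regions
--     """
--     if len(locked) == 0:
--         yield start, end
--     for i in range(0, len(locked)):
--         s, e = locked[i]
--         if i == 0:
--             start = 0
--         if s - start > 0:
--             yield start, (start + (s - start))
--         start = e
--
--         if i == len(locked) - 1 and end - start > 0:
--             yield start, end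
-- ===== SOURCE B (Python) =====
-- def locked_iter(locked, start, end):
--     if len(locked) == 0:
--         yield start, end
--         return
--     yield from _gaps(0, locked, end)
--
--
-- def _gaps(prev, locked, end):
--     """Recursively emit positive-width gaps: prev->first lock start, then
--     recurse past the first lock; base case emits the final prev->end gap."""
--     if not locked:
--         if end - prev > 0:
--             yield prev, end
--         return
--     (s, e), rest = locked[0], locked[1:]
--     if s - prev > 0:
--         yield prev, s
--     yield from _gaps(e, rest, end)
-- ===== Notes on version B (the rewrite author's own statement) =====
-- stated objective: simpler
-- what changed: Replaces A's indexed loop with mutable start, first-iteration reset and last-index special case by structural recursion on the lock list: a helper carrying only the previous boundary emits each positive gap and handles the tail gap in its base case.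
import Mathlib
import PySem

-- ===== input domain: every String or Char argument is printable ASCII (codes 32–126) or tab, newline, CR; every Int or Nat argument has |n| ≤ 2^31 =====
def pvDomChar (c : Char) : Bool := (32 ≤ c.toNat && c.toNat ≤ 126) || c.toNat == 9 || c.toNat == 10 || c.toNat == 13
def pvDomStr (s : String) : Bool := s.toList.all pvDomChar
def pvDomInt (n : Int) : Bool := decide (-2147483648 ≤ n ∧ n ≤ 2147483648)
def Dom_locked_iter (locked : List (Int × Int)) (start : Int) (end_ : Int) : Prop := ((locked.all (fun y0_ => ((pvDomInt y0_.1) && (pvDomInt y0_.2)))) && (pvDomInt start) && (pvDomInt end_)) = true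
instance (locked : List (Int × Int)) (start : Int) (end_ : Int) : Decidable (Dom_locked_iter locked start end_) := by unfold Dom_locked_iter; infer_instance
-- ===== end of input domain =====

-- B replaces A's indexed loop (mutable start, i==0 reset, last-index special case) by structural
-- recursion on the lock list with the tail gap in the base case; objective: simpler, same O(n) cost.

-- ===== PORT A =====
-- the 'for i in range(0, len(locked))' loop, as structural recursion carrying the index i,
-- the loop bound n = len(locked) and the mutable 'start'
def lockedIterLoop (n : Nat) (end_ : Int) (i : Nat) (start : Int) : List (Int × Int) → List (Int × Int)
  | [] => []
  | (s, e) :: rest =>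
    let start1 := if i == 0 then 0 else start
    let y1 : List (Int × Int) := if s - start1 > 0 then [(start1, start1 + (s - start1))] else []
    let start2 := e
    let y2 : List (Int × Int) := if i == n - 1 ∧ end_ - start2 > 0 then [(start2, end_)] else []
    y1 ++ y2 ++ lockedIterLoop n end_ (i + 1) start2 rest

def locked_iter (locked : List (Int × Int)) (start : Int) (end_ : Int) : List (Int × Int) :=
  (if locked.length == 0 then [(start, end_)] else []) ++
    lockedIterLoop locked.length end_ 0 start locked

-- ===== PORT B =====
-- Source B's recursive helper _gaps(prev, locked, end)
def gapsB (prev : Int) (locked : List (Int × Int)) (end_ : Int) : List (Int × Int) :=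
  match locked with
  | [] => if end_ - prev > 0 then [(prev, end_)] else []
  | (s, e) :: rest => (if s - prev > 0 then [(prev, s)] else []) ++ gapsB e rest end_

def locked_iter_alt (locked : List (Int × Int)) (start : Int) (end_ : Int) : List (Int × Int) :=
  if locked.length == 0 then [(start, end_)] else gapsB 0 locked end_

-- ===== PRECONDITION & SPEC =====
def Spec_locked_iter (locked : List (Int × Int)) (start : Int) (end_ : Int) (out : List (Int × Int)) : Prop := out = locked_iter_alt locked start end_
instance (locked : List (Int × Int)) (start : Int) (end_ : Int) (out : List (Int × Int)) : Decidable (Spec_locked_iter locked start end_ out) := by unfold Spec_locked_iter; infer_instance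

-- ===== CLAIM (what is proved, stated in full; the proofs are below) =====
def Claim_equal_locked_iter : Prop := ∀ (locked : List (Int × Int)) (start : Int) (end_ : Int), Dom_locked_iter locked start end_ → Spec_locked_iter locked start end_ (locked_iter locked start end_)

-- ===== LEMMAS AND PROOFS =====

lemma loop_eq_gaps (n : Nat) (end_ : Int) :
    ∀ (l : List (Int × Int)) (i : Nat) (prev : Int), 1 ≤ i → i + l.length = n → l ≠ [] →
      lockedIterLoop n end_ i prev l = gapsB prev l end_ := by
  intro l
  induction l with
  | nil => intro i prev _ _ h; exact absurd rfl h
  | cons p rest ih =>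
    intro i prev hi hn _
    obtain ⟨s, e⟩ := p
    rcases rest with _ | ⟨q, rest'⟩
    · -- last element: i = n - 1
      simp only [List.length] at hn
      have hi0 : (i == 0) = false := by simp; omega
      have hlast : (i == n - 1) = true := by simp; omega
      rw [lockedIterLoop]
      simp only [hi0, hlast, Bool.false_eq_true, if_false, true_and, lockedIterLoop,
        List.append_nil, gapsB]
      split_ifs with h1 h2 <;> simp
    · -- not the last element
      simp only [List.length] at hn
      have hi0 : (i == 0) = false := by simp; omega
      have hlast : (i == n - 1) = false := by simp; omega
      have hih := ih (i + 1) e (by omega) (by simp; omega) (by simp)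
      rw [lockedIterLoop]
      simp only [hi0, hlast, Bool.false_eq_true, if_false, false_and]
      conv_rhs => rw [gapsB]
      rw [hih]
      have hs : prev + (s - prev) = s := by ring
      split_ifs with h1 <;> simp [hs]

theorem locked_iter_eq (locked : List (Int × Int)) (start end_ : Int) :
    locked_iter locked start end_ = locked_iter_alt locked start end_ := by
  rcases locked with _ | ⟨⟨s, e⟩, rest⟩
  · simp [locked_iter, locked_iter_alt, lockedIterLoop]
  · have hne : (((s, e) :: rest).length == 0) = false := by simp
    unfold locked_iter locked_iter_alt
    rw [hne]
    simp only [Bool.false_eq_true, if_false, List.nil_append]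
    -- peel the first iteration of A's loop (i = 0)
    rw [lockedIterLoop]
    conv_rhs => rw [gapsB]
    rcases rest with _ | ⟨q, rest'⟩
    · simp only [lockedIterLoop, gapsB, List.length, beq_self_eq_true, if_true, true_and,
        List.append_nil, Int.sub_zero]
      split_ifs <;> simp
    · have hlast : ((0 : Nat) == ((s, e) :: q :: rest').length - 1) = false := by simp
      rw [loop_eq_gaps _ _ _ 1 e (by omega) (by simp; omega) (by simp)]
      rw [hlast]
      simp only [Bool.false_eq_true, false_and, if_false, beq_self_eq_true, if_true]
      split_ifs <;> simp

-- ===== VERDICT (by name: the statement is the Claim_ definition above) =====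
theorem locked_iter_spec : Claim_equal_locked_iter := by
  intro locked start end_ _
  unfold Spec_locked_iter
  exact locked_iter_eq locked start end_
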